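-- pv_equiv track=rewrite | github.com/DamirGainatullin/AICD | main.py | localIndex
-- ===== SOURCE A (Python) =====
-- def localIndex(index, base):
--     if index < (1 << base):
--         return 0, index
--     i = 0
--     val = index
--     while val != 0:
--         val >>= 1
--         i += 1
--     maxpos = 1<<i - 1
--     return i - base, index - maxpos
-- ===== SOURCE B (Python) =====
-- def localIndex(index, base):
--     if index < (1 << base):
--         return 0, index
--     # Binary search for the top set bit (exponent halving): exact for 0 <= index < 2**32,
--     # which covers the task's |index| <= 2**31 domain.
--     v = index
--     i = 0
--     for s in (16, 8, 4, 2, 1):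
--         if v >> s:
--             v >>= s
--             i += s
--     return i + 1 - base, index - (1 << i)
-- ===== Notes on version B (the rewrite author's own statement) =====
-- stated objective: alternative
-- what changed: A finds the top bit by linearly halving index one bit at a time; B binary-searches for the top set bit with exponentially decreasing shifts (16,8,4,2,1), exact on the task's 32-bit domain, and derives the result from that exponent without a trailing shift by i-1 recomputation of the same count.
import Mathlib
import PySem

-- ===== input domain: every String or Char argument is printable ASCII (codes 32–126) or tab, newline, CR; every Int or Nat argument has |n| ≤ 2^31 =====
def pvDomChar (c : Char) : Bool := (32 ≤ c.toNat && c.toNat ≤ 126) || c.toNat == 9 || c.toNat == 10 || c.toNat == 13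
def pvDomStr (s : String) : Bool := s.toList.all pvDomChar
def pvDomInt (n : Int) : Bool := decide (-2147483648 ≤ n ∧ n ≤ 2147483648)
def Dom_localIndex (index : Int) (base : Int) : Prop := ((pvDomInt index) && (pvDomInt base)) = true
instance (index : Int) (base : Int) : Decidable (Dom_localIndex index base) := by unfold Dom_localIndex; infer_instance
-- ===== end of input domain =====

-- B replaces A's one-bit-at-a-time halving loop by a binary search for the top set
-- bit with shifts 16,8,4,2,1 (exact on the task's 32-bit domain); alternative algorithm.


-- ===== PORT A =====
-- 'while val != 0: val >>= 1; i += 1' — exact for val ≥ 0; for val < 0 Python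
-- diverges, but with 0 ≤ base (Pre_) a negative index takes the early return.
def localIndexLoop (val : Int) (i : Int) : Int :=
  if 0 < val then localIndexLoop (val >>> (1 : Nat)) (i + 1) else i
termination_by val.toNat
decreasing_by
  have h1 : val >>> (1 : Nat) = ((val.toNat / 2 : Nat) : Int) := by
    have hv : val = ((val.toNat : Nat) : Int) := by omega
    rw [hv, ← Int.natCast_shiftRight, Nat.shiftRight_eq_div_pow]; norm_num
  have h2 : 0 < val := by assumption
  omega

def localIndex (index : Int) (base : Int) : Int × Int :=
  -- '1 << base' is exact for 0 ≤ base (Pre_); base < 0 raises ValueError in Python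
  if index < (1 : Int) <<< base.toNat then (0, index)
  else
    let i := localIndexLoop index 0
    let maxpos := (1 : Int) <<< (i - 1).toNat
    (i - base, index - maxpos)

-- ===== PORT B =====
-- one step of Source B's for-loop: 'if v >> s: v >>= s; i += s'
def biStep (p : Int × Int) (s : Nat) : Int × Int :=
  if p.1 >>> s ≠ 0 then (p.1 >>> s, p.2 + (s : Int)) else p

def localIndex_alt (index : Int) (base : Int) : Int × Int :=
  if index < (1 : Int) <<< base.toNat then (0, index)
  else
    let p := [16, 8, 4, 2, 1].foldl biStep (index, 0)
    (p.2 + 1 - base, index - (1 : Int) <<< p.2.toNat)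

-- ===== PRECONDITION & SPEC =====
-- Pre_ excludes base < 0, where Python A raises ValueError ('1 << base', negative shift count).
def Pre_localIndex (index : Int) (base : Int) : Prop := 0 ≤ base
instance (index : Int) (base : Int) : Decidable (Pre_localIndex index base) := by unfold Pre_localIndex; infer_instance
def pvWitness_localIndex : Int × Int := (13, 2)

def Spec_localIndex (index : Int) (base : Int) (out : Int × Int) : Prop := out = localIndex_alt index base
instance (index : Int) (base : Int) (out : Int × Int) : Decidable (Spec_localIndex index base out) := by unfold Spec_localIndex; infer_instance

-- ===== CLAIM =====
def Claim_equal_localIndex : Prop := ∀ (index : Int) (base : Int), Dom_localIndex index base → Pre_localIndex index base → Spec_localIndex index base (localIndex index base)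

-- ===== LEMMAS AND PROOFS =====

-- A's loop computes the bit length of a nonnegative value.
theorem localIndexLoop_eq (n : Nat) : ∀ (i : Int),
    localIndexLoop (n : Int) i = i + (PySem.Int.bitLength (n : Int) : Int) := by
  induction n using Nat.strong_induction_on with
  | _ n ih =>
    intro i
    rw [localIndexLoop]
    by_cases h : 0 < n
    · have hsh : ((n : Int) >>> (1 : Nat)) = ((n / 2 : Nat) : Int) := by
        rw [← Int.natCast_shiftRight, Nat.shiftRight_eq_div_pow]
        try norm_num
      have hbl : PySem.Int.bitLength (n : Int)
          = PySem.Int.bitLength ((n / 2 : Nat) : Int) + 1 := PySem.Int.bitLength_natCast h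
      rw [if_pos (by exact_mod_cast h), hsh, ih (n / 2) (by omega) (i + 1), hbl]
      push_cast; ring
    · have hn : n = 0 := by omega
      subst hn
      simp [PySem.Int.bitLength]

theorem shiftLeft_one_eq (k : Nat) : ((1 : Int) <<< k) = 2 ^ k := by
  simp [Int.shiftLeft_eq]

-- bit length after dividing by 2^s (for 2^s ≤ v)
theorem bl_div_pow (s : Nat) : ∀ (v : Nat), 2 ^ s ≤ v →
    PySem.Int.bitLength ((v / 2 ^ s : Nat) : Int) = PySem.Int.bitLength (v : Int) - s := by
  induction s with
  | zero => intro v _; simp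
  | succ s ih =>
    intro v hv
    have hle : 2 ^ s ≤ v := le_trans (Nat.pow_le_pow_right (by norm_num) (by omega)) hv
    have hdiv : v / 2 ^ (s + 1) = (v / 2 ^ s) / 2 := by
      rw [pow_succ, Nat.div_div_eq_div_mul]
    have hpos : 0 < v / 2 ^ s := Nat.div_pos hle (by positivity)
    have hstep : PySem.Int.bitLength ((v / 2 ^ s : Nat) : Int)
        = PySem.Int.bitLength (((v / 2 ^ s) / 2 : Nat) : Int) + 1 :=
      PySem.Int.bitLength_natCast hpos
    have hblpos : s < PySem.Int.bitLength (v : Int) := by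
      by_contra hc
      push_neg at hc
      have h1 : (v : Int).natAbs < 2 ^ PySem.Int.bitLength (v : Int) :=
        PySem.Int.lt_two_pow_bitLength _
      have h2 : (2 : Nat) ^ PySem.Int.bitLength (v : Int) ≤ 2 ^ s :=
        Nat.pow_le_pow_right (by norm_num) hc
      simp only [Int.natAbs_natCast] at h1
      omega
    rw [hdiv, ← Nat.sub_sub, ← ih v hle]
    omega

-- one biStep on a positive Nat value: yields a positive value, bounded by 2^s,
-- and the counter advances by the bit-length drop.
theorem biStep_eq (v : Nat) (i : Int) (s : Nat) (hv : 0 < v) (hub : v < 2 ^ (2 * s)) :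
    ∃ w : Nat, biStep (((v : Nat) : Int), i) s
        = (((w : Nat) : Int), i + (PySem.Int.bitLength (v : Int) : Int)
            - (PySem.Int.bitLength ((w : Nat) : Int) : Int))
      ∧ 0 < w ∧ w < 2 ^ s := by
  have hsh : ((v : Int) >>> s) = ((v / 2 ^ s : Nat) : Int) := by
    rw [← Int.natCast_shiftRight, Nat.shiftRight_eq_div_pow]
  by_cases hc : 2 ^ s ≤ v
  · refine ⟨v / 2 ^ s, ?_, Nat.div_pos hc (by positivity), ?_⟩
    · have hne : ((v : Int) >>> s) ≠ 0 := by
        rw [hsh]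
        exact Int.natCast_ne_zero.mpr (Nat.div_pos hc (by positivity)).ne'
      simp only [biStep, hne, if_pos, ne_eq, not_false_eq_true, if_true]
      rw [hsh, bl_div_pow s v hc]
      have hblpos : s < PySem.Int.bitLength (v : Int) := by
        by_contra hk
        push_neg at hk
        have h1 : (v : Int).natAbs < 2 ^ PySem.Int.bitLength (v : Int) :=
          PySem.Int.lt_two_pow_bitLength _
        have h2 : (2 : Nat) ^ PySem.Int.bitLength (v : Int) ≤ 2 ^ s :=
          Nat.pow_le_pow_right (by norm_num) hk
        simp only [Int.natAbs_natCast] at h1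
        omega
      have hcast : ((PySem.Int.bitLength (v : Int) - s : Nat) : Int)
          = (PySem.Int.bitLength (v : Int) : Int) - (s : Int) := by
        push_cast [Nat.cast_sub (le_of_lt hblpos)]
        ring
      rw [Prod.mk.injEq, hcast]
      exact ⟨rfl, by ring⟩
    · have : v / 2 ^ s < 2 ^ (2 * s) / 2 ^ s := by
        apply Nat.div_lt_div_of_lt_of_dvd
        · exact pow_dvd_pow 2 (by omega)
        · exact hub
      have hpow : (2 : Nat) ^ (2 * s) / 2 ^ s = 2 ^ s := by
        rw [Nat.pow_div (by omega) (by norm_num)]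
        congr 1
        omega
      omega
  · push_neg at hc
    refine ⟨v, ?_, hv, hc⟩
    have hz : ((v : Int) >>> s) = 0 := by
      rw [hsh, Nat.div_eq_of_lt hc]
      norm_num
    simp [biStep, hz]

-- B's five-step fold computes bitLength − 1 for 0 < v < 2^32.
theorem fold_eq (v : Nat) (hv : 0 < v) (hub : v < 2 ^ 32) :
    [16, 8, 4, 2, 1].foldl biStep (((v : Nat) : Int), 0)
      = (1, (PySem.Int.bitLength (v : Int) : Int) - 1) := by
  obtain ⟨w1, he1, hp1, hb1⟩ := biStep_eq v 0 16 hv (by norm_num at hub ⊢; omega)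
  obtain ⟨w2, he2, hp2, hb2⟩ := biStep_eq w1
    (0 + (PySem.Int.bitLength (v : Int) : Int) - (PySem.Int.bitLength (w1 : Int) : Int))
    8 hp1 (by norm_num at hb1 ⊢; omega)
  obtain ⟨w3, he3, hp3, hb3⟩ := biStep_eq w2
    (0 + (PySem.Int.bitLength (v : Int) : Int) - (PySem.Int.bitLength (w1 : Int) : Int)
       + (PySem.Int.bitLength (w1 : Int) : Int) - (PySem.Int.bitLength (w2 : Int) : Int))
    4 hp2 (by norm_num at hb2 ⊢; omega)
  obtain ⟨w4, he4, hp4, hb4⟩ := biStep_eq w3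
    (0 + (PySem.Int.bitLength (v : Int) : Int) - (PySem.Int.bitLength (w1 : Int) : Int)
       + (PySem.Int.bitLength (w1 : Int) : Int) - (PySem.Int.bitLength (w2 : Int) : Int)
       + (PySem.Int.bitLength (w2 : Int) : Int) - (PySem.Int.bitLength (w3 : Int) : Int))
    2 hp3 (by norm_num at hb3 ⊢; omega)
  obtain ⟨w5, he5, hp5, hb5⟩ := biStep_eq w4
    (0 + (PySem.Int.bitLength (v : Int) : Int) - (PySem.Int.bitLength (w1 : Int) : Int)
       + (PySem.Int.bitLength (w1 : Int) : Int) - (PySem.Int.bitLength (w2 : Int) : Int)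
       + (PySem.Int.bitLength (w2 : Int) : Int) - (PySem.Int.bitLength (w3 : Int) : Int)
       + (PySem.Int.bitLength (w3 : Int) : Int) - (PySem.Int.bitLength (w4 : Int) : Int))
    1 hp4 (by norm_num at hb4 ⊢; omega)
  have hw5 : w5 = 1 := by omega
  subst hw5
  simp only [List.foldl, he1, he2, he3, he4, he5]
  have h1 : PySem.Int.bitLength ((1 : Nat) : Int) = 1 := by decide
  rw [Prod.mk.injEq, h1]
  refine ⟨by norm_num, by push_cast; ring⟩

-- the guard equivalence: for 0 ≤ index, index < 2^k ↔ bitLength index ≤ k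
theorem guard_iff (index : Int) (k : Nat) (hi : 0 ≤ index) :
    index < 2 ^ k ↔ PySem.Int.bitLength index ≤ k := by
  have hcast : (((2 : Nat) ^ k : Nat) : Int) = (2 : Int) ^ k := by push_cast; ring
  constructor
  · intro h
    by_contra hgt
    push_neg at hgt
    have hne : index ≠ 0 := by
      intro h0
      rw [h0] at hgt
      have hz : PySem.Int.bitLength 0 = 0 := by decide
      omega
    have h2 : 2 ^ (PySem.Int.bitLength index - 1) ≤ index.natAbs :=
      PySem.Int.two_pow_bitLength_le index hne
    have h3 : (2 : Nat) ^ k ≤ 2 ^ (PySem.Int.bitLength index - 1) :=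
      Nat.pow_le_pow_right (by norm_num) (by omega)
    have h5 : (((2 : Nat) ^ k : Nat) : Int) ≤ index := by
      have : (2 : Nat) ^ k ≤ index.toNat := by omega
      omega
    rw [hcast] at h5
    omega
  · intro h
    have h1 : index.natAbs < 2 ^ PySem.Int.bitLength index :=
      PySem.Int.lt_two_pow_bitLength index
    have h2 : (2 : Nat) ^ PySem.Int.bitLength index ≤ 2 ^ k :=
      Nat.pow_le_pow_right (by norm_num) h
    have h5 : index < (((2 : Nat) ^ k : Nat) : Int) := by omega
    rw [hcast] at h5
    omega

-- ===== VERDICT =====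
theorem localIndex_spec : Claim_equal_localIndex := by
  intro index base hdom hb
  unfold Pre_localIndex at hb
  unfold Spec_localIndex localIndex localIndex_alt
  by_cases hlt : index < (1 : Int) <<< base.toNat
  · rw [if_pos hlt, if_pos hlt]
  · rw [if_neg hlt, if_neg hlt]
    push_neg at hlt
    rw [shiftLeft_one_eq] at hlt
    have hpos : 0 < index := lt_of_lt_of_le (by positivity) hlt
    have hidx : index = ((index.toNat : Nat) : Int) := by omega
    have hub : index.toNat < 2 ^ 32 := by
      unfold Dom_localIndex at hdom
      simp [pvDomInt] at hdom
      norm_num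
      omega
    have hloop : localIndexLoop index 0 = (PySem.Int.bitLength index : Int) := by
      rw [hidx, localIndexLoop_eq index.toNat 0, ← hidx]; ring
    have hfold : [16, 8, 4, 2, 1].foldl biStep (index, 0)
        = (1, (PySem.Int.bitLength index : Int) - 1) := by
      rw [hidx, fold_eq index.toNat (by omega) hub, ← hidx]
    have hblpos : 1 ≤ PySem.Int.bitLength index := by
      by_contra hc
      have : PySem.Int.bitLength index ≤ 0 := by omega
      have := (guard_iff index 0 (le_of_lt hpos)).2 (by omega)
      norm_num at this
      omega
    simp only [hloop, hfold]
    rw [Prod.mk.injEq]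
    exact ⟨by ring, rfl⟩
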